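-- pv_equiv track=rewrite | github.com/Male-D1ng/Ex.Python | Guia6/guia6_y_otros.py | suma_matriz_fila_cola
-- ===== SOURCE A (Python) =====
-- def suma_matriz_fila_cola (fila: int, columna: int) -> int:
--     i : int = 1
--     k: int = 0
--     while i <= fila:
--         j: int = 1
--         while j <= columna:
--             k += j+i
--             j +=1
--         i += 1
--     return k
-- ===== SOURCE B (Python) =====
-- def suma_matriz_fila_cola(fila: int, columna: int) -> int:
--     f = max(fila, 0)
--     c = max(columna, 0)
--     return c * f * (f + 1) // 2 + f * c * (c + 1) // 2
-- ===== Notes on version B (the rewrite author's own statement) =====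
-- stated objective: faster
-- what changed: Replaced the two nested while loops with the closed-form arithmetic sums c*f*(f+1)/2 + f*c*(c+1)/2 (with negative bounds clamped to 0).
import Mathlib
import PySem

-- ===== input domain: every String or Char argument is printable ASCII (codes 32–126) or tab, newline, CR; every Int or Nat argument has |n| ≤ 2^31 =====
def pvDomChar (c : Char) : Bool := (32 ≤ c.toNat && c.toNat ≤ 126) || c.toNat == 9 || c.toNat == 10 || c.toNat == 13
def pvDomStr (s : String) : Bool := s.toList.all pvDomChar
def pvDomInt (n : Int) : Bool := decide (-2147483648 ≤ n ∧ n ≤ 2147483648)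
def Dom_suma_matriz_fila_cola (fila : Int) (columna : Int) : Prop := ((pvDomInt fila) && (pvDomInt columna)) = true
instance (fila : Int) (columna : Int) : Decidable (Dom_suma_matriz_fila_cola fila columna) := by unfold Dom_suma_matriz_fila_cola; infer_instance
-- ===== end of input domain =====

-- B replaces A's nested loops with the closed-form arithmetic sums (objective: faster, O(1) vs O(fila*columna)).

-- ===== PORT A =====
-- inner while loop: 'while j <= columna: k += j+i; j += 1'
def pvInnerA (i columna j k : Int) : Int :=
  if j ≤ columna then pvInnerA i columna (j + 1) (k + (j + i)) else k
termination_by (columna + 1 - j).toNat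
decreasing_by omega

-- outer while loop: 'while i <= fila: <inner loop>; i += 1'
def pvOuterA (fila columna i k : Int) : Int :=
  if i ≤ fila then pvOuterA fila columna (i + 1) (pvInnerA i columna 1 k) else k
termination_by (fila + 1 - i).toNat
decreasing_by omega

def suma_matriz_fila_cola (fila : Int) (columna : Int) : Int :=
  pvOuterA fila columna 1 0

-- ===== PORT B =====
def suma_matriz_fila_cola_alt (fila : Int) (columna : Int) : Int :=
  let f := max fila 0
  let c := max columna 0
  PySem.Int.floordiv (c * f * (f + 1)) 2 + PySem.Int.floordiv (f * c * (c + 1)) 2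

-- ===== PRECONDITION & SPEC =====
def Spec_suma_matriz_fila_cola (fila : Int) (columna : Int) (out : Int) : Prop := out = suma_matriz_fila_cola_alt fila columna
instance (fila : Int) (columna : Int) (out : Int) : Decidable (Spec_suma_matriz_fila_cola fila columna out) := by unfold Spec_suma_matriz_fila_cola; infer_instance

-- ===== CLAIM (what is proved, stated in full; the proofs are below) =====
def Claim_equal_suma_matriz_fila_cola : Prop := ∀ (fila : Int) (columna : Int), Dom_suma_matriz_fila_cola fila columna → Spec_suma_matriz_fila_cola fila columna (suma_matriz_fila_cola fila columna)

-- ===== LEMMAS AND PROOFS =====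

-- twice the inner loop's value, parametrised by the number n of remaining iterations
theorem pvInnerA_val (i columna : Int) (n : Nat) :
    ∀ j k : Int, (columna + 1 - j).toNat = n →
      2 * pvInnerA i columna j k = 2 * k + 2 * (n : Int) * (i + j) + (n : Int) * ((n : Int) - 1) := by
  induction n with
  | zero =>
    intro j k h
    rw [pvInnerA]
    have hj : ¬ j ≤ columna := by omega
    simp [hj]
  | succ m ih =>
    intro j k h
    rw [pvInnerA]
    have hj : j ≤ columna := by omega
    simp only [hj, if_true]
    have := ih (j + 1) (k + (j + i)) (by omega)
    rw [this]
    push_cast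
    ring

-- twice the inner loop's value starting at j = 1
theorem pvInnerA_one (i columna k : Int) :
    2 * pvInnerA i columna 1 k =
      2 * k + 2 * (columna.toNat : Int) * i + (columna.toNat : Int) * ((columna.toNat : Int) + 1) := by
  have := pvInnerA_val i columna columna.toNat 1 k (by omega)
  rw [this]; ring

-- twice the outer loop's value, parametrised by the number n of remaining iterations
theorem pvOuterA_val (fila columna : Int) (n : Nat) :
    ∀ i k : Int, (fila + 1 - i).toNat = n →
      2 * pvOuterA fila columna i k =
        2 * k + 2 * (columna.toNat : Int) * ((n : Int) * i)
          + (columna.toNat : Int) * (n : Int) * ((n : Int) - 1)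
          + (n : Int) * (columna.toNat : Int) * ((columna.toNat : Int) + 1) := by
  induction n with
  | zero =>
    intro i k h
    rw [pvOuterA]
    have hi : ¬ i ≤ fila := by omega
    simp [hi]
  | succ m ih =>
    intro i k h
    rw [pvOuterA]
    have hi : i ≤ fila := by omega
    simp only [hi, if_true]
    have h1 := ih (i + 1) (pvInnerA i columna 1 k) (by omega)
    have h2 := pvInnerA_one i columna k
    rw [h1, h2]
    push_cast
    ring

theorem two_dvd_mul_consec (a b : Int) : (2 : Int) ∣ a * b * (b + 1) := by
  rcases Int.even_mul_succ_self b with ⟨t, ht⟩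
  exact ⟨a * t, by rw [mul_assoc, ht]; ring⟩

theorem floordiv_consec (a b : Int) :
    2 * PySem.Int.floordiv (a * b * (b + 1)) 2 = a * b * (b + 1) := by
  rw [PySem.Int.floordiv_eq_ediv_of_pos (by norm_num : (0:Int) < 2)]
  exact Int.mul_ediv_cancel' (two_dvd_mul_consec a b) 

-- ===== VERDICT (by name: the statement is the Claim_ definition above) =====
theorem suma_matriz_fila_cola_spec : Claim_equal_suma_matriz_fila_cola := by
  unfold Claim_equal_suma_matriz_fila_cola
  intro fila columna _
  unfold Spec_suma_matriz_fila_cola suma_matriz_fila_cola suma_matriz_fila_cola_alt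
  have hA := pvOuterA_val fila columna fila.toNat 1 0 (by omega)
  have hf : (max fila 0 : Int) = (fila.toNat : Int) := by omega
  have hc : (max columna 0 : Int) = (columna.toNat : Int) := by omega
  have h1 := floordiv_consec (columna.toNat : Int) (fila.toNat : Int)
  have h2 := floordiv_consec (fila.toNat : Int) (columna.toNat : Int)
  simp only [hf, hc]
  nlinarith [hA, h1, h2]
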